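-- pv_equiv track=rewrite | github.com/cse-ahsankhan/BennaAI | ingest/chunker.py | _merge_small_segments
-- ===== SOURCE A (Python) =====
-- from typing import List, Dict, Any, Optional
--
-- def _merge_small_segments(segments: List[tuple], min_words: int = 50) -> List[tuple]:
--     """Merge segments under min_words into the following sibling."""
--     if not segments:
--         return segments
--     result = []
--     i = 0
--     while i < len(segments):
--         seg_text, clause, header = segments[i]
--         if len(seg_text.split()) < min_words and i + 1 < len(segments):
--             next_text, next_clause, next_header = segments[i + 1]
--             segments[i + 1] = (
--                 seg_text + "\n" + next_text,
--                 clause or next_clause,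
--                 header or next_header,
--             )
--             i += 1
--             continue
--         result.append((seg_text, clause, header))
--         i += 1
--     return result
-- ===== SOURCE B (Python) =====
-- def _merge_small_segments(segments, min_words=50):
--     """Merge segments under min_words into the following sibling.
--
--     Single pass: keep a buffer of pending texts with a running word count and
--     join once per emitted group, instead of re-splitting/concatenating the
--     growing merged text at every step.  (Return value only: unlike A, this
--     does not mutate `segments` in place.)
--     """
--     result = []
--     buf, wc, clause, header = [], 0, None, None
--     n = len(segments)
--     for idx in range(n):
--         text, c, h = segments[idx]
--         buf.append(text)
--         wc += len(text.split())
--         clause = clause or c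
--         header = header or h
--         if wc >= min_words or idx == n - 1:
--             result.append(("\n".join(buf), clause, header))
--             buf, wc, clause, header = [], 0, None, None
--     return result
-- ===== Notes on version B (the rewrite author's own statement) =====
-- stated objective: faster
-- what changed: Single pass with a running word count and one deferred join per emitted group, instead of re-splitting and re-concatenating the growing merged text at every merge step (B also does not mutate the input list, A does).
import Mathlib
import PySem

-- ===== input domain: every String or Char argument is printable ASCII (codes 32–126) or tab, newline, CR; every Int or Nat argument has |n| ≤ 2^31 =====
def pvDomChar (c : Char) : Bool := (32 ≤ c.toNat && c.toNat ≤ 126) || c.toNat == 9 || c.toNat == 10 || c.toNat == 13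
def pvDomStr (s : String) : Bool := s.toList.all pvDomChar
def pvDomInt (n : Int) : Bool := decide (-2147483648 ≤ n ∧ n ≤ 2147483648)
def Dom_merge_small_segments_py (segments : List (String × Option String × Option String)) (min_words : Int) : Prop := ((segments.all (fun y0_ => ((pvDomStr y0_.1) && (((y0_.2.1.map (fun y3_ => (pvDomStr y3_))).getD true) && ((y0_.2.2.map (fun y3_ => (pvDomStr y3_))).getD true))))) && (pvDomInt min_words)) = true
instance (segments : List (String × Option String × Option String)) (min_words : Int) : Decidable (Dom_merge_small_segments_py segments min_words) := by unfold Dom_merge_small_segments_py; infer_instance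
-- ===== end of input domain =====

-- ===== PORT A =====
-- B changes the algorithm (single pass, running word count, one join per group); equivalence is about
-- the return value only: Python A also mutates `segments` in place, B does not.
-- Python truthiness of an Optional[str]: `a or b`
def pyOrStr (a b : Option String) : Option String :=
  match a with
  | some s => if s = "" then b else some s
  | none => b

-- the while loop of A: the in-progress merged segment always sits at the head
def mergeGoA (min_words : Int) : List (String × Option String × Option String) → List (String × Option String × Option String)
  | [] => []
  | [(t, c, h)] => [(t, c, h)]
  | (t, c, h) :: (nt, nc, nh) :: rest2 =>
    if ((PySem.Str.split₀ t).length : Int) < min_words then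
      mergeGoA min_words ((t ++ "\n" ++ nt, pyOrStr c nc, pyOrStr h nh) :: rest2)
    else (t, c, h) :: mergeGoA min_words ((nt, nc, nh) :: rest2)
  termination_by l => l.length
  decreasing_by all_goals simp

def merge_small_segments_py (segments : List (String × Option String × Option String)) (min_words : Int) : List (String × Option String × Option String) :=
  if segments = [] then segments else mergeGoA min_words segments

-- ===== PORT B =====
-- state: pending texts buf, running word count wc, pending clause/header; emit one joined group
def mergeGoB (min_words : Int) (buf : List String) (wc : Nat) (cl hd : Option String) : List (String × Option String × Option String) → List (String × Option String × Option String)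
  | [] => []
  | (t, c, h) :: rest =>
    let buf' := buf ++ [t]
    let wc' := wc + (PySem.Str.split₀ t).length
    let cl' := pyOrStr cl c
    let hd' := pyOrStr hd h
    if (wc' : Int) ≥ min_words ∨ rest = [] then
      (PySem.Str.join "\n" buf', cl', hd') :: mergeGoB min_words [] 0 none none rest
    else mergeGoB min_words buf' wc' cl' hd' rest

def merge_small_segments_py_alt (segments : List (String × Option String × Option String)) (min_words : Int) : List (String × Option String × Option String) :=
  mergeGoB min_words [] 0 none none segments

-- ===== PRECONDITION & SPEC =====
def Spec_merge_small_segments_py (segments : List (String × Option String × Option String)) (min_words : Int) (out : List (String × Option String × Option String)) : Prop := out = merge_small_segments_py_alt segments min_words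
instance (segments : List (String × Option String × Option String)) (min_words : Int) (out : List (String × Option String × Option String)) : Decidable (Spec_merge_small_segments_py segments min_words out) := by unfold Spec_merge_small_segments_py; infer_instance

-- ===== CLAIM (what is proved, stated in full; the proofs are below) =====
def Claim_equal_merge_small_segments_py : Prop := ∀ (segments : List (String × Option String × Option String)) (min_words : Int), Dom_merge_small_segments_py segments min_words → Spec_merge_small_segments_py segments min_words (merge_small_segments_py segments min_words)

-- ===== LEMMAS AND PROOFS =====

-- word count of a string, as both ports compute it
def wcS (s : String) : Nat := (PySem.Str.split₀ s).length

-- split₀.go: the accumulator only contributes its own length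
theorem split0_go_length_acc (s : List Char) : ∀ (cur : List Char) (acc : List (List Char)),
    (PySem.Chars.split₀.go s cur acc).length = acc.length + (PySem.Chars.split₀.go s cur []).length := by
  induction s with
  | nil =>
    intro cur acc
    simp only [PySem.Chars.split₀.go]
    split <;> simp
  | cons c rest ih =>
    intro cur acc
    simp only [PySem.Chars.split₀.go]
    split
    · split
      · exact ih [] acc
      · rw [ih [] (cur.reverse :: acc), ih [] [cur.reverse]]
        simp; omega
    · exact ih (c :: cur) acc

-- splitting around a whitespace separator: the two sides' word counts add
theorem split0_go_length_append (b : List Char) (sep : Char) (hsep : PySem.Chars.isspace sep = true) :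
    ∀ (a cur : List Char) (acc : List (List Char)),
      (PySem.Chars.split₀.go (a ++ sep :: b) cur acc).length
        = (PySem.Chars.split₀.go a cur acc).length + (PySem.Chars.split₀.go b [] []).length := by
  intro a
  induction a with
  | nil =>
    intro cur acc
    simp only [List.nil_append, PySem.Chars.split₀.go, hsep, if_true]
    by_cases hcur : cur.isEmpty = true
    · simp only [hcur, if_true]
      rw [split0_go_length_acc b [] acc]
      simp
    · simp only [hcur, Bool.false_eq_true, if_false]
      rw [split0_go_length_acc b [] (cur.reverse :: acc)]
      simp
  | cons c a' ih =>
    intro cur acc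
    simp only [List.cons_append, PySem.Chars.split₀.go]
    split
    · split
      · exact ih [] acc
      · exact ih [] (cur.reverse :: acc)
    · exact ih (c :: cur) acc

-- word count through the toList bridge
theorem wcS_eq_chars (s : String) : wcS s = (PySem.Chars.split₀ s.toList).length := by
  unfold wcS
  rw [← PySem.Str.split₀_map_toList, List.length_map]

-- additivity of the word count over x ++ "\n" ++ y
theorem wcS_append_newline (x y : String) : wcS (x ++ "\n" ++ y) = wcS x + wcS y := by
  rw [wcS_eq_chars, wcS_eq_chars, wcS_eq_chars]
  have ht : (x ++ "\n" ++ y).toList = x.toList ++ '\n' :: y.toList := by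
    simp [String.toList_append]
  rw [ht]
  simp only [PySem.Chars.split₀]
  exact split0_go_length_append y.toList '\n' (by decide) x.toList [] []

-- Chars.join when one more piece is appended to a nonempty list
theorem chars_join_append (sep x : List Char) : ∀ (l : List (List Char)), l ≠ [] →
    PySem.Chars.join sep (l ++ [x]) = PySem.Chars.join sep l ++ sep ++ x := by
  intro l
  induction l with
  | nil => intro hb; exact absurd rfl hb
  | cons p rest ih =>
    intro _
    cases rest with
    | nil => simp [PySem.Chars.join_cons_cons, PySem.Chars.join_singleton]
    | cons q rest2 =>
      simp only [List.cons_append, PySem.Chars.join_cons_cons]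
      rw [show (q :: rest2) ++ [x] = q :: (rest2 ++ [x]) from rfl] at ih
      rw [ih (by simp)]
      simp [List.append_assoc]

-- Str.join on a single string
theorem join_singleton_str (t : String) : PySem.Str.join "\n" [t] = t := by
  rw [← String.toList_inj, PySem.Str.toList_join]
  simp [PySem.Chars.join_singleton]

-- Str.join when one more string is appended to a nonempty buffer
theorem join_append_str (buf : List String) (t : String) (hb : buf ≠ []) :
    PySem.Str.join "\n" (buf ++ [t]) = PySem.Str.join "\n" buf ++ "\n" ++ t := by
  rw [← String.toList_inj, PySem.Str.toList_join]
  simp only [String.toList_append, PySem.Str.toList_join, List.map_append, List.map_cons,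
    List.map_nil]
  exact chars_join_append "\n".toList t.toList (buf.map String.toList) (by simpa using hb)

-- the running word count of B equals the word count of the joined buffer
theorem wcS_join (buf : List String) (hb : buf ≠ []) :
    wcS (PySem.Str.join "\n" buf) = (buf.map wcS).sum := by
  induction buf with
  | nil => exact absurd rfl hb
  | cons p rest ih =>
    cases rest with
    | nil => simp [join_singleton_str]
    | cons q rest2 =>
      have hsplit : PySem.Str.join "\n" (p :: q :: rest2)
          = p ++ "\n" ++ PySem.Str.join "\n" (q :: rest2) := by
        rw [← String.toList_inj, PySem.Str.toList_join]
        simp [PySem.Chars.join_cons_cons, PySem.Str.toList_join, String.toList_append]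
      rw [hsplit, wcS_append_newline, ih (by simp)]
      simp

-- the heart of the equivalence: A with the in-progress merged segment at its head
-- equals B resumed with the corresponding pending state
theorem goA_eq_goB (m : Int) : ∀ (l : List (String × Option String × Option String))
    (buf : List String) (wc : Nat) (cl hd : Option String), buf ≠ [] → wc = (buf.map wcS).sum →
    mergeGoA m ((PySem.Str.join "\n" buf, cl, hd) :: l) =
      if (wc : Int) ≥ m ∨ l = [] then
        (PySem.Str.join "\n" buf, cl, hd) :: mergeGoB m [] 0 none none l
      else mergeGoB m buf wc cl hd l := by
  intro l
  induction l with
  | nil =>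
    intro buf wc cl hd hb hwc
    simp [mergeGoA, mergeGoB]
  | cons seg l2 ih =>
    intro buf wc cl hd hb hwc
    obtain ⟨nt, nc, nh⟩ := seg
    have hwcJ : ((PySem.Str.split₀ (PySem.Str.join "\n" buf)).length : Int) = (wc : Int) := by
      rw [hwc, ← wcS_join buf hb]; rfl
    by_cases hlt : (wc : Int) < m
    · -- A merges into the next segment; B keeps accumulating
      rw [mergeGoA, if_pos (by rw [hwcJ]; exact hlt)]
      rw [← join_append_str buf nt hb]
      rw [ih (buf ++ [nt]) (wc + wcS nt) (pyOrStr cl nc) (pyOrStr hd nh) (by simp)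
          (by rw [hwc]; simp)]
      have hcond : ¬ ((wc : Int) ≥ m ∨ ((nt, nc, nh) :: l2 : List (String × Option String × Option String)) = []) := by
        push Not; exact ⟨by omega, by simp⟩
      rw [if_neg hcond, mergeGoB]
      simp only [wcS]
    · -- A emits the head; B flushes the buffer
      rw [mergeGoA, if_neg (by rw [hwcJ]; omega)]
      rw [if_pos (Or.inl (by omega))]
      congr 1
      -- mergeGoA on the untouched tail = a fresh run of B
      rw [mergeGoB]
      have hih := ih [nt] (wcS nt) nc nh (by simp) (by simp)
      rw [join_singleton_str] at hih
      rw [hih]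
      simp [pyOrStr, join_singleton_str, wcS]

theorem merge_eq_alt (segments : List (String × Option String × Option String)) (m : Int) :
    merge_small_segments_py segments m = merge_small_segments_py_alt segments m := by
  cases segments with
  | nil => rfl
  | cons seg rest =>
    obtain ⟨t, c, h⟩ := seg
    show mergeGoA m ((t, c, h) :: rest) = mergeGoB m [] 0 none none ((t, c, h) :: rest)
    have hC := goA_eq_goB m rest [t] (wcS t) c h (by simp) (by simp)
    rw [join_singleton_str] at hC
    rw [hC, mergeGoB]
    simp [pyOrStr, join_singleton_str, wcS]

-- ===== VERDICT (by name: the statement is the Claim_ definition above) =====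
theorem merge_small_segments_py_spec : Claim_equal_merge_small_segments_py := by
  intro segments min_words _
  unfold Spec_merge_small_segments_py
  exact merge_eq_alt segments min_words
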